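-- pv_equiv track=rewrite | github.com/helimanbelaid/2048 | 22.py | peut_deplacer_direction
-- ===== SOURCE A (Python) =====
-- def peut_deplacer_direction(plateau, direction):
--     def deplacement_possible(plateau):
--         taille = len(plateau)
--         for i in range(taille):
--             for j in range(taille):
--                 if plateau[i][j] == 0:
--                     return True
--                 if i < taille - 1 and plateau[i][j] == plateau[i + 1][j]:
--                     return True
--                 if j < taille - 1 and plateau[i][j] == plateau[i][j + 1]:
--                     return True
--         return False
--
--     nouveau_plateau = deplacer(plateau, direction)
--     return nouveau_plateau != plateau
--
-- def deplacer(plateau, direction):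
--     def glisser(ligne):
--         nouvelle_ligne = [num for num in ligne if num != 0]
--         nouvelle_ligne += [0] * (len(ligne) - len(nouvelle_ligne))
--         return nouvelle_ligne
--
--     def combiner(ligne):
--         for i in range(len(ligne) - 1):
--             if ligne[i] == ligne[i + 1] and ligne[i] != 0:
--                 ligne[i] *= 2
--                 ligne[i + 1] = 0
--         return ligne
--
--     tourne = False
--     if direction in ('up', 'down'):
--         plateau = [list(ligne) for ligne in zip(*plateau)]
--         tourne = True
--
--     if direction in ('down', 'right'):
--         plateau = [ligne[::-1] for ligne in plateau]
--
--     nouveau_plateau = []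
--     for ligne in plateau:
--         nouvelle_ligne = glisser(combiner(glisser(ligne)))
--         nouveau_plateau.append(nouvelle_ligne)
--
--     if direction in ('down', 'right'):
--         nouveau_plateau = [ligne[::-1] for ligne in nouveau_plateau]
--
--     if tourne:
--         nouveau_plateau = [list(ligne) for ligne in zip(*nouveau_plateau)]
--
--     return nouveau_plateau
-- ===== SOURCE B (Python) =====
-- def peut_deplacer_direction(plateau, direction):
--     # A move changes the board iff some oriented line changes when slid and merged.
--     def ligne_change(ligne):
--         valeurs = [v for v in ligne if v != 0]
--         fusion = []
--         i = 0
--         while i < len(valeurs):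
--             if i + 1 < len(valeurs) and valeurs[i] == valeurs[i + 1]:
--                 fusion.append(2 * valeurs[i])
--                 i += 2
--             else:
--                 fusion.append(valeurs[i])
--                 i += 1
--         return fusion + [0] * (len(ligne) - len(fusion)) != ligne
--
--     if direction in ('up', 'down'):
--         lignes = [list(c) for c in zip(*plateau)]
--     else:
--         lignes = plateau
--     if direction in ('down', 'right'):
--         lignes = [l[::-1] for l in lignes]
--     return any(ligne_change(l) for l in lignes)
-- ===== Notes on version B (the rewrite author's own statement) =====
-- stated objective: faster
-- what changed: A builds the whole moved board via deplacer (slide, in-place index-loop merge pass, slide again per line, plus reverse/transpose back) and compares it to the input; B never builds the moved board: it orients the lines once (transpose for up/down, reversal for down/right), computes each line's slid-and-merged form in a single merge pass over the nonzero values, and short-circuits via any() as soon as one line changes. …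
-- outside the precondition, e.g. on peut_deplacer_direction([[1], [2, 3]], 'up'): A returns True, B returns False; on peut_deplacer_direction([[]], 'up'): A returns True, B returns False
import Mathlib
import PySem

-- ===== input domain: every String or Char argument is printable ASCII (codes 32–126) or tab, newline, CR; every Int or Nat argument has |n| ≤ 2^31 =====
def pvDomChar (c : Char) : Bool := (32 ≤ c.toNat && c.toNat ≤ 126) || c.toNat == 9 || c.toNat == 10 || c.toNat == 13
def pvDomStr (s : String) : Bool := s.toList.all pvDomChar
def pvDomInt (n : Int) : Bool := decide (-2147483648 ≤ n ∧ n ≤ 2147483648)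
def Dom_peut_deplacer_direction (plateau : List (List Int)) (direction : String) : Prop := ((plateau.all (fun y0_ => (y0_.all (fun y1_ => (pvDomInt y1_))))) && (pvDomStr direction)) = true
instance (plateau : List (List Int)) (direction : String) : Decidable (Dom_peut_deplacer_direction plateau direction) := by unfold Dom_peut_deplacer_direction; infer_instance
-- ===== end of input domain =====

-- B checks per oriented line whether sliding-and-merging changes it, instead of building the
-- whole moved board and comparing (objective: faster by a constant factor).

-- ===== PORT A =====

-- Python `zip(*plateau)` as a list of lists: rows of heads while every list is nonempty
-- (helper shared by both ports; the lemma below it is only for zipT's termination).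
theorem pvZipT_sum_tail_le (xss : List (List Int)) :
    ((xss.map (fun r => r.tail)).map List.length).sum ≤ (xss.map List.length).sum := by
  induction xss with
  | nil => simp
  | cons x t ih =>
      simp only [List.map_cons, List.sum_cons]
      have : x.tail.length ≤ x.length := by cases x <;> simp
      omega

theorem pvZipT_sum_tail_lt (xss : List (List Int)) (h1 : xss ≠ [])
    (h2 : xss.all (fun r => !r.isEmpty) = true) :
    ((xss.map (fun r => r.tail)).map List.length).sum < (xss.map List.length).sum := by
  cases xss with
  | nil => exact absurd rfl h1
  | cons x t =>
      simp only [List.all_cons, Bool.and_eq_true] at h2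
      have hxl : x.tail.length < x.length := by cases x with | nil => simp_all | cons a b => simp
      have hle := pvZipT_sum_tail_le t
      simp only [List.map_cons, List.sum_cons]
      omega

def zipT (xss : List (List Int)) : List (List Int) :=
  if xss = [] then []
  else if xss.all (fun r => !r.isEmpty) then
    (xss.map (fun r => r.headD 0)) :: zipT (xss.map (fun r => r.tail))
  else []
termination_by (xss.map List.length).sum
decreasing_by
  simp only [List.map_subtype, List.unattach_attach]
  exact pvZipT_sum_tail_lt xss (by assumption) (by assumption)

def glisser (ligne : List Int) : List Int :=
  let nouvelle_ligne := ligne.filter (fun num => decide (num ≠ 0))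
  nouvelle_ligne ++ List.replicate (ligne.length - nouvelle_ligne.length) 0

-- one step of combiner's `for i in range(len(ligne) - 1)` loop (in-place updates → List.set)
def combStep (ligne : List Int) (i : Nat) : List Int :=
  if ligne.getD i 0 = ligne.getD (i+1) 0 ∧ ligne.getD i 0 ≠ 0 then
    (ligne.set i (ligne.getD i 0 * 2)).set (i+1) 0
  else ligne

def combiner (ligne : List Int) : List Int :=
  (List.range (ligne.length - 1)).foldl combStep ligne

def peut_deplacer_direction (plateau : List (List Int)) (direction : String) : Bool :=
  -- nouveau_plateau = deplacer(plateau, direction):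
  let p1 := if direction = "up" ∨ direction = "down" then zipT plateau else plateau
  let p2 := if direction = "down" ∨ direction = "right" then p1.map List.reverse else p1
  let np := p2.map (fun ligne => glisser (combiner (glisser ligne)))
  let np2 := if direction = "down" ∨ direction = "right" then np.map List.reverse else np
  let np3 := if direction = "up" ∨ direction = "down" then zipT np2 else np2
  -- return nouveau_plateau != plateau
  decide (np3 ≠ plateau)

-- ===== PORT B =====

-- Source B's while loop over `valeurs`: one left-to-right merge pass over the nonzero values
def fusionner : List Int → List Int
  | a :: b :: t => if a = b then (2 * a) :: fusionner t else a :: fusionner (b :: t)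
  | l => l
termination_by l => l.length

def ligne_change (ligne : List Int) : Bool :=
  let m := fusionner (ligne.filter (fun v => decide (v ≠ 0)))
  decide (m ++ List.replicate (ligne.length - m.length) 0 ≠ ligne)

def lignesCheck (lignes : List (List Int)) (direction : String) : Bool :=
  (if direction = "down" ∨ direction = "right" then lignes.map List.reverse else lignes).any
    ligne_change

def peut_deplacer_direction_alt (plateau : List (List Int)) (direction : String) : Bool :=
  lignesCheck (if direction = "up" ∨ direction = "down" then zipT plateau else plateau) direction

-- ===== PRECONDITION & SPEC =====
-- Pre_ excludes vertical moves on non-rectangular or empty-row boards (outside the game's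
-- natural square-board domain), where A's zip-transpose silently truncates columns and A
-- reports True merely because the board was re-shaped.
def Pre_peut_deplacer_direction (plateau : List (List Int)) (direction : String) : Prop :=
  (direction = "up" ∨ direction = "down") →
    (plateau = [] ∨ ((plateau.headD []).length ≠ 0 ∧
      ∀ r ∈ plateau, r.length = (plateau.headD []).length))
instance (plateau : List (List Int)) (direction : String) : Decidable (Pre_peut_deplacer_direction plateau direction) := by unfold Pre_peut_deplacer_direction; infer_instance
def pvWitness_peut_deplacer_direction : List (List Int) × String := ([[2, 0], [0, 2]], "up")

def Spec_peut_deplacer_direction (plateau : List (List Int)) (direction : String) (out : Bool) : Prop := out = peut_deplacer_direction_alt plateau direction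
instance (plateau : List (List Int)) (direction : String) (out : Bool) : Decidable (Spec_peut_deplacer_direction plateau direction out) := by unfold Spec_peut_deplacer_direction; infer_instance

-- ===== CLAIM (what is proved, stated in full; the proofs are below) =====
def Claim_equal_peut_deplacer_direction : Prop := ∀ (plateau : List (List Int)) (direction : String), Dom_peut_deplacer_direction plateau direction → Pre_peut_deplacer_direction plateau direction → Spec_peut_deplacer_direction plateau direction (peut_deplacer_direction plateau direction)

-- ===== LEMMAS AND PROOFS =====

-- structural form of A's index/mutation loop `combiner`
def combAux : List Int → List Int
  | a :: b :: t => if a = b ∧ a ≠ 0 then (a * 2) :: combAux (0 :: t) else a :: combAux (b :: t)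
  | l => l
termination_by l => l.length

theorem getD_appl (p l : List Int) (k : Nat) : (p ++ l).getD (p.length + k) 0 = l.getD k 0 := by
  simp [List.getD, List.getElem?_append_right]

theorem set_appl (p l : List Int) (k : Nat) (x : Int) :
    (p ++ l).set (p.length + k) x = p ++ l.set k x := by
  rw [List.set_append]; simp

theorem foldl_combStep (r p : List Int) :
    (List.range' p.length (r.length - 1)).foldl combStep (p ++ r) = p ++ combAux r := by
  induction r using combAux.induct generalizing p with
  | case1 a b t hab ih =>
      have h0 := getD_appl p (a::b::t) 0
      have h1 := getD_appl p (a::b::t) 1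
      simp only [Nat.add_zero] at h0
      simp only [List.length_cons, Nat.add_sub_cancel, List.range'_succ, List.foldl_cons]
      have hstep : combStep (p ++ a :: b :: t) p.length = p ++ (a*2) :: 0 :: t := by
        rw [combStep, if_pos (by rw [h0, h1]; exact hab), h0]
        simp only [List.getD_cons_zero]
        have hs0 := set_appl p (a::b::t) 0 (a*2)
        simp only [Nat.add_zero, List.set_cons_zero] at hs0
        rw [hs0, set_appl p ((a*2)::b::t) 1 0]
        rfl
      rw [hstep, show p ++ (a*2) :: 0 :: t = (p ++ [a*2]) ++ 0 :: t by simp,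
        show p.length + 1 = (p ++ [a*2]).length by simp,
        show t.length = (0::t).length - 1 from rfl, ih, combAux, if_pos hab]
      simp
  | case2 a b t hab ih =>
      have h0 := getD_appl p (a::b::t) 0
      have h1 := getD_appl p (a::b::t) 1
      simp only [Nat.add_zero] at h0
      simp only [List.length_cons, Nat.add_sub_cancel, List.range'_succ, List.foldl_cons]
      have hstep : combStep (p ++ a :: b :: t) p.length = p ++ a :: b :: t := by
        rw [combStep, if_neg]; rw [h0, h1]; exact hab
      rw [hstep, show p ++ a :: b :: t = (p ++ [a]) ++ b :: t by simp,
        show p.length + 1 = (p ++ [a]).length by simp]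
      have := ih (p ++ [a])
      simp only [List.length_cons, Nat.add_sub_cancel] at this
      rw [this, combAux, if_neg hab]
      simp
  | case3 l h =>
      cases l with
      | nil => simp [combAux]
      | cons a l' =>
          cases l' with
          | nil => simp [combAux]
          | cons b t => exact absurd rfl (h a b t)

theorem combiner_eq (l : List Int) : combiner l = combAux l := by
  have := foldl_combStep l []
  rw [combiner]
  simpa [List.range_eq_range'] using this

theorem combAux_cons_zero (t : List Int) : combAux (0 :: t) = 0 :: combAux t := by
  cases t with
  | nil => simp [combAux]
  | cons b t' => rw [combAux, if_neg (by simp)]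

theorem combAux_length (l : List Int) : (combAux l).length = l.length := by
  induction l using combAux.induct with
  | case1 a b t hab ih => rw [combAux, if_pos hab]; simp only [List.length_cons] at *; omega
  | case2 a b t hab ih => rw [combAux, if_neg hab]; simp only [List.length_cons] at *; omega
  | case3 l h =>
      cases l with
      | nil => simp [combAux]
      | cons a l' => cases l' with
          | nil => simp [combAux]
          | cons b t => exact absurd rfl (h a b t)

theorem combAux_replicate_zero (m : Nat) :
    combAux (List.replicate m 0) = List.replicate m 0 := by
  induction m with
  | zero => simp [combAux]
  | succ k ih => rw [List.replicate_succ, combAux_cons_zero, ih]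

-- B's single merge pass computes exactly the nonzero values of A's combiner output
theorem filter_combAux (c : List Int) (hc : ∀ x ∈ c, x ≠ 0) (m : Nat) :
    (combAux (c ++ List.replicate m 0)).filter (fun v => decide (v ≠ 0)) = fusionner c := by
  induction c using fusionner.induct with
  | case1 b t ih =>
      have hb : b ≠ 0 := hc b (by simp)
      rw [List.cons_append, List.cons_append, combAux, if_pos ⟨rfl, hb⟩, combAux_cons_zero,
        fusionner, if_pos rfl]
      simp only [List.filter_cons]
      rw [ih (fun x hx => hc x (by simp [hx]))]
      have h2 : b * 2 ≠ 0 := mul_ne_zero hb (by norm_num)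
      simp [h2, mul_comm]
  | case2 a b t hab ih =>
      have ha : a ≠ 0 := hc a (by simp)
      rw [List.cons_append, List.cons_append, combAux, if_neg (by tauto), ← List.cons_append,
        fusionner, if_neg hab]
      simp only [List.filter_cons]
      rw [ih (fun x hx => hc x (by simp [hx]))]
      simp [ha]
  | case3 l h =>
      cases l with
      | nil => simp [combAux_replicate_zero, fusionner]
      | cons a l' => cases l' with
          | cons b t => exact absurd rfl (h a b t)
          | nil =>
              have ha : a ≠ 0 := hc a (by simp)
              cases m with
              | zero => simp [combAux, fusionner, ha]
              | succ k =>
                  rw [List.replicate_succ, List.cons_append, List.nil_append, combAux,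
                    if_neg (by simp [ha]), combAux_cons_zero, combAux_replicate_zero]
                  simp [fusionner, ha]

def moveB (l : List Int) : List Int :=
  let m := fusionner (l.filter (fun v => decide (v ≠ 0)))
  m ++ List.replicate (l.length - m.length) 0

theorem fusionner_length_le (l : List Int) : (fusionner l).length ≤ l.length := by
  induction l using fusionner.induct with
  | case1 b t ih => rw [fusionner, if_pos rfl]; simp only [List.length_cons]; omega
  | case2 a b t hab ih => rw [fusionner, if_neg hab]; simp only [List.length_cons] at *; omega
  | case3 l h =>
      cases l with
      | nil => simp [fusionner]
      | cons a l' => cases l' with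
          | nil => simp [fusionner]
          | cons b t => exact absurd rfl (h a b t)

theorem moveB_length (l : List Int) : (moveB l).length = l.length := by
  have h1 := fusionner_length_le (l.filter (fun v => decide (v ≠ 0)))
  have h2 := List.length_filter_le (fun v => decide (v ≠ 0)) l
  simp only [moveB, List.length_append, List.length_replicate]
  omega

theorem glisser_length (l : List Int) : (glisser l).length = l.length := by
  have h2 := List.length_filter_le (fun v => decide (v ≠ 0)) l
  simp only [glisser, List.length_append, List.length_replicate]
  omega

theorem moveA_eq_moveB (l : List Int) : glisser (combiner (glisser l)) = moveB l := by
  have hmem : ∀ x ∈ l.filter (fun v => decide (v ≠ 0)), x ≠ 0 := by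
    intro x hx; simpa using (List.mem_filter.mp hx).2
  have hcl : (combiner (glisser l)).length = l.length := by
    rw [combiner_eq, combAux_length, glisser_length]
  have hfc : (combiner (glisser l)).filter (fun v => decide (v ≠ 0))
      = fusionner (l.filter (fun v => decide (v ≠ 0))) := by
    rw [combiner_eq]
    exact filter_combAux _ hmem _
  set C := combiner (glisser l) with hC
  simp only [glisser, moveB]
  rw [hfc, hcl]

theorem moveA_length (l : List Int) : (glisser (combiner (glisser l))).length = l.length := by
  rw [moveA_eq_moveB, moveB_length]

-- ---- zipT lemmas ----

theorem zipT_nil : zipT [] = [] := by simp [zipT]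

theorem zipT_row_len (xss : List (List Int)) : ∀ r ∈ zipT xss, r.length = xss.length := by
  induction xss using zipT.induct with
  | case1 => simp [zipT]
  | case2 xss h1 h2 ih =>
      rw [zipT, if_neg h1, if_pos h2]
      simp only [List.map_subtype, List.unattach_attach] at ih
      intro r hr
      rcases List.mem_cons.mp hr with h | h
      · simp [h]
      · have := ih r h; simpa using this
  | case3 xss h1 h2 => rw [zipT, if_neg h1, if_neg h2]; simp

theorem getD_tail {α : Type} (l : List α) (j : Nat) (d : α) : l.tail.getD j d = l.getD (j+1) d := by
  cases l <;> simp [List.getD]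

theorem headD_eq_getD {α : Type} (l : List α) (d : α) : l.headD d = l.getD 0 d := by
  cases l <;> simp [List.getD]

theorem zipT_char (w : Nat) (p : List (List Int)) (hp : p ≠ []) (hw : ∀ r ∈ p, r.length = w) :
    zipT p = (List.range w).map (fun j => p.map (fun r => r.getD j 0)) := by
  induction w generalizing p with
  | zero =>
      rw [List.range_zero, List.map_nil, zipT, if_neg hp, if_neg]
      intro hall
      obtain ⟨x, t, rfl⟩ := List.exists_cons_of_ne_nil hp
      have h1 := List.all_eq_true.mp hall x (by simp)
      have h2 := hw x (by simp)
      cases x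
      · simp at h1
      · simp at h2
  | succ w ih =>
      have hall : p.all (fun r => !r.isEmpty) = true := by
        apply List.all_eq_true.mpr
        intro r hr
        have hl := hw r hr
        cases r
        · simp at hl
        · simp
      rw [zipT, if_neg hp, if_pos hall]
      have htl : zipT (p.map (fun r => r.tail)) =
          (List.range w).map (fun j => (p.map (fun r => r.tail)).map (fun r => r.getD j 0)) := by
        apply ih
        · simpa using hp
        · intro r hr
          obtain ⟨s, hs, rfl⟩ := List.mem_map.mp hr
          have hl := hw s hs
          cases s
          · simp at hl
          · simp at hl ⊢; omega
      rw [htl, List.range_succ_eq_map, List.map_cons, List.map_map]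
      congr 1
      · apply List.map_congr_left; intro r _; exact headD_eq_getD r 0
      · apply List.map_congr_left
        intro j _
        simp only [Function.comp, List.map_map]
        apply List.map_congr_left
        intro r _
        exact getD_tail r j 0

theorem zipT_zipT (w : Nat) (p : List (List Int)) (hp : p ≠ []) (hw0 : 0 < w)
    (hw : ∀ r ∈ p, r.length = w) : zipT (zipT p) = p := by
  have hq := zipT_char w p hp hw
  have hqne : zipT p ≠ [] := by
    rw [hq]; simp [List.range_eq_nil]; omega
  have hqrow : ∀ c ∈ zipT p, c.length = p.length := zipT_row_len p
  rw [zipT_char p.length (zipT p) hqne hqrow, hq]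
  apply List.ext_getElem
  · simp
  · intro i h1 h2
    simp only [List.getElem_map, List.getElem_range, List.map_map]
    have hlen : p[i].length = w := hw p[i] (List.getElem_mem h2)
    apply List.ext_getElem
    · simp [hlen]
    · intro j hj1 hj2
      simp only [List.getElem_map, List.getElem_range, Function.comp]
      rw [List.getD_eq_getElem _ _ (by simpa using h2), List.getElem_map,
        List.getD_eq_getElem _ _ (by omega)]

-- ---- board-level bridging ----

theorem map_eq_self {α : Type} (f : α → α) (p : List α) : p.map f = p ↔ ∀ x ∈ p, f x = x := by
  induction p with
  | nil => simp
  | cons x t ih => simp [ih]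

theorem decide_map_ne_any (f : List Int → List Int) (g : List Int → Bool)
    (hg : ∀ l, g l = decide (f l ≠ l)) (p : List (List Int)) :
    decide (p.map f ≠ p) = p.any g := by
  by_cases h : p.map f = p
  · have : p.any g = false := by
      rw [List.any_eq_false]
      intro l hl
      rw [hg]
      simpa using (map_eq_self f p).mp h l hl
    simp [h, this]
  · have : p.any g = true := by
      rw [List.any_eq_true]
      have hex : ∃ x ∈ p, f x ≠ x := by
        by_contra hc
        push Not at hc
        exact h ((map_eq_self f p).mpr hc)
      obtain ⟨x, hx, hne⟩ := hex
      exact ⟨x, hx, by rw [hg]; simpa using hne⟩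
    simp [h, this]

theorem ligne_change_eq (l : List Int) : ligne_change l = decide (moveB l ≠ l) := rfl

-- the reversed-lines comparison A makes for down/right, as B's per-line any-check
theorem rev_case (q : List (List Int)) :
    decide (((q.map List.reverse).map moveB).map List.reverse ≠ q)
      = (q.map List.reverse).any ligne_change := by
  rw [List.map_map, List.map_map, List.any_map]
  apply decide_map_ne_any
  intro l
  simp only [Function.comp_apply, ligne_change_eq]
  apply decide_eq_decide.mpr
  apply not_congr
  rw [List.reverse_eq_iff]

-- the oriented lines of q, each moved by A's glisser/combiner/glisser
def orientMoved (q : List (List Int)) (direction : String) : List (List Int) :=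
  let q2 := if direction = "down" ∨ direction = "right" then q.map List.reverse else q
  let np := q2.map (fun ligne => glisser (combiner (glisser ligne)))
  if direction = "down" ∨ direction = "right" then np.map List.reverse else np

theorem core_check (q : List (List Int)) (direction : String) :
    decide (orientMoved q direction ≠ q) = lignesCheck q direction := by
  have hmv : (fun ligne => glisser (combiner (glisser ligne))) = moveB := funext moveA_eq_moveB
  rw [orientMoved, lignesCheck]
  by_cases hdr : direction = "down" ∨ direction = "right"
  · simp only [if_pos hdr, hmv]
    exact rev_case q
  · simp only [if_neg hdr, hmv]
    exact decide_map_ne_any moveB ligne_change ligne_change_eq q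

theorem orientMoved_nil (direction : String) : orientMoved [] direction = [] := by
  simp [orientMoved]

theorem orientMoved_ne_nil (q : List (List Int)) (direction : String) (hq : q ≠ []) :
    orientMoved q direction ≠ [] := by
  rw [orientMoved]
  split <;> simp [hq]

theorem orientMoved_rows (q : List (List Int)) (direction : String) (m : Nat)
    (hq : ∀ r ∈ q, r.length = m) : ∀ r ∈ orientMoved q direction, r.length = m := by
  intro r hr
  rw [orientMoved] at hr
  split at hr
  · obtain ⟨s, hs, rfl⟩ := List.mem_map.mp hr
    obtain ⟨u, hu, rfl⟩ := List.mem_map.mp hs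
    obtain ⟨v, hv, rfl⟩ := List.mem_map.mp hu
    simp only [List.length_reverse]
    rw [moveA_length]
    simpa using hq v hv
  · obtain ⟨u, hu, rfl⟩ := List.mem_map.mp hr
    rw [moveA_length]
    exact hq u hu

-- the whole up/down branch on a rectangular, nonempty-row board (Pre_'s guarantee)
theorem hud_rect (p : List (List Int)) (direction : String)
    (hpre : p = [] ∨ ((p.headD []).length ≠ 0 ∧ ∀ r ∈ p, r.length = (p.headD []).length)) :
    decide (zipT (orientMoved (zipT p) direction) ≠ p) = lignesCheck (zipT p) direction := by
  rcases hpre with rfl | ⟨hw0ne, hrect⟩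
  · rw [zipT_nil, orientMoved_nil, zipT_nil, lignesCheck]
    split <;> simp
  · have hpn : p ≠ [] := by
      rintro rfl
      exact hw0ne rfl
    have hw0pos : 0 < (p.headD []).length := Nat.pos_of_ne_zero hw0ne
    have hqne : zipT p ≠ [] := by
      rw [zipT_char (p.headD []).length p hpn hrect]
      simp only [ne_eq, List.map_eq_nil_iff, List.range_eq_nil]
      omega
    have hmpos : 0 < p.length := List.length_pos_of_ne_nil hpn
    have hnp2row : ∀ r ∈ orientMoved (zipT p) direction, r.length = p.length :=
      orientMoved_rows (zipT p) direction p.length (zipT_row_len p)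
    have hnp2ne : orientMoved (zipT p) direction ≠ [] :=
      orientMoved_ne_nil (zipT p) direction hqne
    have hiff : zipT (orientMoved (zipT p) direction) = p ↔
        orientMoved (zipT p) direction = zipT p := by
      constructor
      · intro h
        have h2 := zipT_zipT p.length (orientMoved (zipT p) direction) hnp2ne hmpos hnp2row
        rw [← h2, h]
      · intro h
        rw [h, zipT_zipT (p.headD []).length p hpn hw0pos hrect]
    rw [decide_eq_decide.mpr (not_congr hiff)]
    exact core_check (zipT p) direction

-- ===== VERDICT (by name: the statement is the Claim_ definition above) =====
theorem peut_deplacer_direction_spec : Claim_equal_peut_deplacer_direction := by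
  intro p direction _ hpre
  unfold Spec_peut_deplacer_direction
  simp only [peut_deplacer_direction, peut_deplacer_direction_alt]
  by_cases hud : direction = "up" ∨ direction = "down"
  · simp only [if_pos hud]
    exact hud_rect p direction (hpre hud)
  · simp only [if_neg hud]
    exact core_check p direction
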